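-- pv_equiv track=rewrite | github.com/artjeka2003art-ux/12345 | ghost.py | needs_fs_write
-- ===== SOURCE A (Python) =====
-- def needs_fs_write(cmd: str) -> bool:
--     low = (cmd or "").lower()
--     patterns = [
--         "rm ", "mv ", "cp ", "touch ", "mkdir ", "rmdir ",
--         "chmod ", "chown ", "ln ", "tee ", "echo >",
--         "apt ", "apt-get ", "dpkg ", "pip ", "pip3 ",
--         "sed -i", "truncate ", "dd ", "mkfs", "mount ", "umount "
--     ]
--     return any(p in low for p in patterns)
-- ===== SOURCE B (Python) =====
-- PATTERNS = [
--     'rm ',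
--     'mv ',
--     'cp ',
--     'touch ',
--     'mkdir ',
--     'rmdir ',
--     'chmod ',
--     'chown ',
--     'ln ',
--     'tee ',
--     'echo >',
--     'apt ',
--     'apt-get ',
--     'dpkg ',
--     'pip ',
--     'pip3 ',
--     'sed -i',
--     'truncate ',
--     'dd ',
--     'mkfs',
--     'mount ',
--     'umount ',
-- ]
--
--
-- def _build_trie(patterns):
--     # trie node = {"end": bool, "kids": {char: node}}
--     root = {"end": False, "kids": {}}
--     for p in patterns:
--         node = root
--         for ch in p:
--             node = node["kids"].setdefault(ch, {"end": False, "kids": {}})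
--         node["end"] = True
--     return root
--
--
-- _TRIE = _build_trie(PATTERNS)
--
--
-- def needs_fs_write(cmd: str) -> bool:
--     low = (cmd or "").lower()  # walk the trie from every start position
--     n = len(low)
--     for i in range(n):
--         node = _TRIE
--         for j in range(i, n):
--             node = node["kids"].get(low[j])
--             if node is None:
--                 break
--             if node["end"]:
--                 return True
--     return False
-- ===== Notes on version B (the rewrite author's own statement) =====
-- stated objective: alternative
-- what changed: Builds a shared character trie of all patterns once and decides the question by walking the trie from each start position, so the 21 independent substring scans of A are replaced by one trie traversal per position that matches all patterns simultaneously.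
import Mathlib
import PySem

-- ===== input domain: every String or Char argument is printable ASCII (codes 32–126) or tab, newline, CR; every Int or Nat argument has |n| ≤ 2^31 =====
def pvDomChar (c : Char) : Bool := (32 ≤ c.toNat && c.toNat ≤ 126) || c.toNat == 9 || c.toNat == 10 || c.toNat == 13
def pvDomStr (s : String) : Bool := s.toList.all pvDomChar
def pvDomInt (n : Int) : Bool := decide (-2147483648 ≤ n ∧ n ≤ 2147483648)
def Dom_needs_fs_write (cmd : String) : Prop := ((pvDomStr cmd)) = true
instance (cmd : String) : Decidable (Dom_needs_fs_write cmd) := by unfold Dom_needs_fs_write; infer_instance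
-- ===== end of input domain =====

-- B replaces A's per-pattern substring scans by one shared trie of the patterns walked from each position; same return value, no speed claim.

-- ===== PORT A =====
def pvPatternsA : List String :=
  ["rm ", "mv ", "cp ", "touch ", "mkdir ", "rmdir ",
   "chmod ", "chown ", "ln ", "tee ", "echo >",
   "apt ", "apt-get ", "dpkg ", "pip ", "pip3 ",
   "sed -i", "truncate ", "dd ", "mkfs", "mount ", "umount "]

def needs_fs_write (cmd : String) : Bool :=
  -- low = (cmd or "").lower(); 'cmd or ""' is cmd when nonempty, else ""
  let low := PySem.Str.lower (if cmd = "" then "" else cmd)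
  pvPatternsA.any (fun p => PySem.Str.isIn p low)

-- ===== PORT B =====
def pvPatternsB : List String :=
  ["rm ", "mv ", "cp ", "touch ", "mkdir ", "rmdir ",
   "chmod ", "chown ", "ln ", "tee ", "echo >",
   "apt ", "apt-get ", "dpkg ", "pip ", "pip3 ",
   "sed -i", "truncate ", "dd ", "mkfs", "mount ", "umount "]

-- trie node = {"end": bool, "kids": {char: node}} (mutual pair instead of a nested inductive)
mutual
inductive PvTrie : Type where
  | node (term : Bool) (kids : PvEdges) : PvTrie
inductive PvEdges : Type where
  | nil : PvEdges
  | econs (c : Char) (t : PvTrie) (rest : PvEdges) : PvEdges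
end

def pvIsEnd : PvTrie → Bool
  | .node b _ => b

def pvKids : PvTrie → PvEdges
  | .node _ es => es

-- node["kids"].get(c)
def pvFind? : PvEdges → Char → Option PvTrie
  | .nil, _ => none
  | .econs d t rest, c => if d = c then some t else pvFind? rest c

-- the child for c, fresh empty node if absent (the read half of setdefault)
def pvGetChild (es : PvEdges) (c : Char) : PvTrie :=
  (pvFind? es c).getD (.node false .nil)

-- store (possibly new) child for c (the write half of setdefault)
def pvSetChild : PvEdges → Char → PvTrie → PvEdges
  | .nil, c, t => .econs c t .nil
  | .econs d u rest, c, t =>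
      if d = c then .econs d t rest else .econs d u (pvSetChild rest c t)

-- the inner 'for ch in p' loop of _build_trie, plus the final node["end"] = True
def pvInsert : PvTrie → List Char → PvTrie
  | .node _ es, [] => .node true es
  | .node b es, c :: cs => .node b (pvSetChild es c (pvInsert (pvGetChild es c) cs))

-- _build_trie(patterns)
def pvBuild (ps : List String) : PvTrie :=
  ps.foldl (fun t p => pvInsert t p.toList) (.node false .nil)

-- the inner 'for j in range(i, n)' walk of needs_fs_write
def pvWalk : PvTrie → List Char → Bool
  | _, [] => false
  | t, c :: cs =>
      match pvFind? (pvKids t) c with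
      | none => false
      | some u => pvIsEnd u || pvWalk u cs

-- the outer 'for i in range(n)' loop: walk from every start position
def pvScanB : PvTrie → List Char → Bool
  | _, [] => false
  | t, c :: rest => pvWalk t (c :: rest) || pvScanB t rest

def needs_fs_write_alt (cmd : String) : Bool :=
  let low := PySem.Str.lower (if cmd = "" then "" else cmd)
  pvScanB (pvBuild pvPatternsB) low.toList

-- ===== PRECONDITION & SPEC =====
def Spec_needs_fs_write (cmd : String) (out : Bool) : Prop := out = needs_fs_write_alt cmd
instance (cmd : String) (out : Bool) : Decidable (Spec_needs_fs_write cmd out) := by unfold Spec_needs_fs_write; infer_instance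

-- ===== CLAIM (what is proved, stated in full; the proofs are below) =====
def Claim_equal_needs_fs_write : Prop := ∀ (cmd : String), Dom_needs_fs_write cmd → Spec_needs_fs_write cmd (needs_fs_write cmd)

-- ===== LEMMAS AND PROOFS =====

theorem pvFind?_setChild : ∀ (es : PvEdges) (c : Char) (t : PvTrie) (d : Char),
    pvFind? (pvSetChild es c t) d = if c = d then some t else pvFind? es d
  | .nil, c, t, d => by simp [pvSetChild, pvFind?]
  | .econs e u rest, c, t, d => by
      simp only [pvSetChild]
      by_cases hec : e = c
      · subst hec
        by_cases hed : e = d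
        · simp [pvFind?, hed]
        · simp [pvFind?, hed]
      · simp only [if_neg hec, pvFind?, pvFind?_setChild rest c t d]
        by_cases hed : e = d
        · subst hed
          have hne : ¬ c = e := fun h => hec (Eq.symm h)
          simp [hne]
        · simp [hed]

-- the walk never detects anything in a fresh empty node
theorem pvWalk_empty (l : List Char) : pvWalk (.node false .nil) l = false := by
  cases l <;> simp [pvWalk, pvKids, pvFind?]

-- the walk ignores the root's terminal flag
theorem pvWalk_term_irrel (b b' : Bool) (es : PvEdges) (l : List Char) :
    pvWalk (.node b es) l = pvWalk (.node b' es) l := by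
  cases l <;> simp [pvWalk, pvKids]

theorem pvIsEnd_insert (t : PvTrie) (q : List Char) :
    pvIsEnd (pvInsert t q) = (q.isEmpty || pvIsEnd t) := by
  cases t; cases q <;> simp [pvInsert, pvIsEnd]

-- inserting pattern p adds exactly the words with p as a (nonempty) prefix
theorem pvWalk_insert (p : List Char) : ∀ (t : PvTrie) (l : List Char),
    pvWalk (pvInsert t p) l = true ↔ pvWalk t l = true ∨ (p ≠ [] ∧ p <+: l) := by
  induction p with
  | nil =>
      intro t l
      cases t with
      | node b es =>
          simp only [pvInsert, ne_eq, not_true_eq_false, false_and, or_false]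
          rw [pvWalk_term_irrel true b]
  | cons c cs ih =>
      intro t l
      cases t with
      | node b es =>
        cases l with
        | nil => simp [pvWalk]
        | cons d ds =>
            have hL : pvWalk (.node b (pvSetChild es c (pvInsert (pvGetChild es c) cs))) (d :: ds)
                = if c = d then (pvIsEnd (pvInsert (pvGetChild es c) cs)
                    || pvWalk (pvInsert (pvGetChild es c) cs) ds)
                  else pvWalk (.node b es) (d :: ds) := by
              by_cases h : c = d
              · subst h
                rw [if_pos rfl]
                simp only [pvWalk, pvKids, pvFind?_setChild]
                simp
              · rw [if_neg h]
                simp only [pvWalk, pvKids, pvFind?_setChild]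
                rw [if_neg h]
            show pvWalk (pvInsert (.node b es) (c :: cs)) (d :: ds) = true ↔ _
            rw [show pvInsert (.node b es) (c :: cs)
                = .node b (pvSetChild es c (pvInsert (pvGetChild es c) cs)) from rfl, hL]
            by_cases h : c = d
            · subst h
              rw [if_pos rfl]
              have hR : pvWalk (.node b es) (c :: ds)
                  = (pvIsEnd (pvGetChild es c) || pvWalk (pvGetChild es c) ds) := by
                simp only [pvWalk, pvKids, pvGetChild]
                cases hfind : pvFind? es c with
                | none => simp [pvIsEnd, pvWalk_empty]
                | some u => simp
              rw [hR]
              simp only [Bool.or_eq_true, pvIsEnd_insert, ih, List.cons_prefix_cons,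
                ne_eq, reduceCtorEq, not_false_eq_true, true_and]
              cases cs with
              | nil => simp
              | cons x xs => simp; tauto
            · rw [if_neg h]
              simp only [List.cons_prefix_cons, ne_eq, reduceCtorEq, not_false_eq_true, true_and]
              have hnot : ¬ (c = d ∧ cs <+: ds) := fun hh => h hh.1
              tauto

theorem pvWalk_build_aux (ps : List String) : ∀ (t : PvTrie) (l : List Char),
    pvWalk (ps.foldl (fun t p => pvInsert t p.toList) t) l = true ↔
      pvWalk t l = true ∨ ∃ p ∈ ps, p.toList ≠ [] ∧ p.toList <+: l := by
  induction ps with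
  | nil => simp
  | cons q qs ih =>
      intro t l
      simp only [List.foldl_cons, ih, pvWalk_insert, List.mem_cons]
      constructor
      · rintro ((h | h) | ⟨p, hp, h⟩)
        · exact Or.inl h
        · exact Or.inr ⟨q, Or.inl rfl, h⟩
        · exact Or.inr ⟨p, Or.inr hp, h⟩
      · rintro (h | ⟨p, (rfl | hp), h⟩)
        · exact Or.inl (Or.inl h)
        · exact Or.inl (Or.inr h)
        · exact Or.inr ⟨p, hp, h⟩

theorem pvWalk_build (ps : List String) (l : List Char) :
    pvWalk (pvBuild ps) l = true ↔ ∃ p ∈ ps, p.toList ≠ [] ∧ p.toList <+: l := by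
  rw [pvBuild, pvWalk_build_aux, pvWalk_empty]
  simp

theorem pvScanB_iff (t : PvTrie) (P : List (List Char))
    (hw : ∀ l', pvWalk t l' = true ↔ ∃ p ∈ P, p ≠ [] ∧ p <+: l') :
    ∀ l, pvScanB t l = true ↔ ∃ p ∈ P, p ≠ [] ∧ p <:+: l := by
  intro l
  induction l with
  | nil =>
      constructor
      · intro h; simp [pvScanB] at h
      · rintro ⟨p, hp, hne, hinf⟩
        exact absurd (List.infix_nil.mp hinf) hne
  | cons c rest ih =>
      simp only [pvScanB, Bool.or_eq_true, hw, ih, List.infix_cons_iff]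
      constructor
      · rintro (⟨p, hp, hne, hpre⟩ | ⟨p, hp, hne, hinf⟩)
        · exact ⟨p, hp, hne, Or.inl hpre⟩
        · exact ⟨p, hp, hne, Or.inr hinf⟩
      · rintro ⟨p, hp, hne, hpre | hinf⟩
        · exact Or.inl ⟨p, hp, hne, hpre⟩
        · exact Or.inr ⟨p, hp, hne, hinf⟩

-- ===== VERDICT (by name: the statement is the Claim_ definition above) =====
theorem needs_fs_write_spec : Claim_equal_needs_fs_write := by
  intro cmd _
  unfold Spec_needs_fs_write needs_fs_write needs_fs_write_alt
  rw [Bool.eq_iff_iff]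
  rw [pvScanB_iff _ (pvPatternsB.map String.toList) (by
    intro l'
    rw [pvWalk_build]
    simp only [List.mem_map]
    constructor
    · rintro ⟨p, hp, hne, hpre⟩; exact ⟨p.toList, ⟨p, hp, rfl⟩, hne, hpre⟩
    · rintro ⟨q, ⟨p, hp, rfl⟩, hne, hpre⟩; exact ⟨p, hp, hne, hpre⟩)]
  simp only [List.any_eq_true, PySem.Str.isIn_iff_infix, List.mem_map]
  constructor
  · rintro ⟨p, hp, hinf⟩
    have hne : ∀ q ∈ pvPatternsA, q.toList ≠ [] := by decide
    exact ⟨p.toList, ⟨p, hp, rfl⟩, hne p hp, hinf⟩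
  · rintro ⟨q, ⟨p, hp, rfl⟩, hne, hinf⟩; exact ⟨p, hp, hinf⟩
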